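-- pv_equiv track=rewrite | github.com/fformenti/foobar | save_beta_rabbit/solution.py | answer
-- ===== SOURCE A (Python) =====
-- def answer(food, grid):
--     N = len(grid)
--     ans_grid = [[set() for i in range(N)] for j in range(N)]
--     ans_grid[0][0] = {grid[0][0]}
--     for (row, row_val) in enumerate(grid):
--         for (col, val) in enumerate(row_val):
--             if row != 0:
--             	for x in ans_grid[row-1][col]:
-- 	            	if (val + x) <= food:
-- 	            		new_val = val + x
-- 	            		ans_grid[row][col].add(new_val)
--             if col != 0:
--             	for x in ans_grid[row][col-1]:
--             		if (val + x) <= food: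
--             			new_val = val + x
--             			ans_grid[row][col].add(new_val)
--
--     all_ans = sorted(ans_grid[N-1][N-1], reverse=True)
--
--     for el in all_ans:
--         if el <= food:
--             return food-el
--     return - 1
-- ===== SOURCE B (Python) =====
-- def answer(food, grid):
--     N = len(grid)
--     memo = {}
--
--     def reach(r, c):
--         key = (r, c)
--         if key in memo:
--             return memo[key]
--         row = grid[r]
--         if c >= len(row):
--             res = frozenset()
--         elif r == 0 and c == 0:
--             res = frozenset([row[0]])
--         else:
--             parents = frozenset()
--             if r > 0:
--                 parents |= reach(r - 1, c)
--             if c > 0: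
--                 parents |= reach(r, c - 1)
--             v = row[c]
--             res = frozenset(v + s for s in parents if v + s <= food)
--         memo[key] = res
--         return res
--
--     feasible = [s for s in reach(N - 1, N - 1) if s <= food]
--     return food - max(feasible) if feasible else -1
-- ===== Notes on version B (the rewrite author's own statement) =====
-- stated objective: alternative
-- what changed: B replaces A's bottom-up N-by-N table of mutable per-cell sets (filled row-major, corner set then sorted descending and scanned) by demand-driven top-down memoized recursion from the target cell over immutable frozensets, returning food - max() of the feasible corner sums with no table and no sort.
-- outside the precondition, e.g. on answer(9, [[2, 144]]): A returns 7, B returns 7; on answer(50, [[1, 2, 9], [3, 4]]): A raises IndexError, B returns 42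
import Mathlib
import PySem

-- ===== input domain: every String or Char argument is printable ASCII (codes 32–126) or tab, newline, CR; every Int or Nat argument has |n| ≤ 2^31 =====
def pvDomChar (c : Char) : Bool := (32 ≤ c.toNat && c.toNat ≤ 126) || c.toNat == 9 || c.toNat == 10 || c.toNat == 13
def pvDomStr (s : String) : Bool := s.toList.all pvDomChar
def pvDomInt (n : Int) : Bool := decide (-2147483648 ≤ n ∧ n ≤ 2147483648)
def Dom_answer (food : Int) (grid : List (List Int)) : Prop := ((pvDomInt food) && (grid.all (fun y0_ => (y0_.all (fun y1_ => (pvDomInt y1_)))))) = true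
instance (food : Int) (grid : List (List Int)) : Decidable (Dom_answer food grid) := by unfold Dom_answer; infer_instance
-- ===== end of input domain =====

-- B replaces A's bottom-up N×N table of mutable per-cell sets (filled row-major, corner set
-- then sorted descending and scanned) by demand-driven top-down memoized recursion from the
-- target cell over immutable sets, taking max() of the feasible corner sums (objective:
-- alternative; no table and no sort).

-- ===== PORT A =====
-- ans_grid[row][col] access/update (Python list indexing / assignment)
def pvCellA (g : List (List (PySem.Set Int))) (r c : Int) : PySem.Set Int :=
  PySem.List.pyGetD (PySem.List.pyGetD g r []) c []

def pvSetCellA (g : List (List (PySem.Set Int))) (r c : Int) (v : PySem.Set Int) :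
    List (List (PySem.Set Int)) :=
  PySem.List.pySetD g r (PySem.List.pySetD (PySem.List.pyGetD g r []) c v)

-- 'for x in src: if (val + x) <= food: ans_grid[row][col].add(val + x)'
def pvAddAll (food val : Int) (src s : PySem.Set Int) : PySem.Set Int :=
  src.foldl (fun t x => if val + x ≤ food then PySem.Set.add t (val + x) else t) s

-- body of A's double loop at one cell (row, col) with value val
def pvStep (food : Int) (g : List (List (PySem.Set Int))) (row col val : Int) :
    List (List (PySem.Set Int)) :=
  let s0 := pvCellA g row col
  let s1 := if row ≠ 0 then pvAddAll food val (pvCellA g (row - 1) col) s0 else s0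
  let s2 := if col ≠ 0 then pvAddAll food val (pvCellA g row (col - 1)) s1 else s1
  pvSetCellA g row col s2

-- 'for (col, val) in enumerate(row_val): …' for one row
def pvRowA (food : Int) (g : List (List (PySem.Set Int))) (p : Int × List Int) :
    List (List (PySem.Set Int)) :=
  (PySem.List.enumerate p.2).foldl (fun h q => pvStep food h p.1 q.1 q.2) g

def answer (food : Int) (grid : List (List Int)) : Int :=
  let N := grid.length
  let g00 := PySem.List.pyGetD (PySem.List.pyGetD grid 0 []) 0 (0 : Int)
  let init := pvSetCellA (List.replicate N (List.replicate N PySem.Set.empty)) 0 0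
      (PySem.Set.ofList [g00])
  let fin := (PySem.List.enumerate grid).foldl (pvRowA food) init
  let allAns := PySem.List.sorted (pvCellA fin ((N : Int) - 1) ((N : Int) - 1)) (fun x => x) true
  match allAns.find? (fun el => decide (el ≤ food)) with
  | some el => food - el
  | none => -1

-- ===== PORT B =====
-- 'frozenset(v + s for s in parents if v + s <= food)'
def pvBuild (food v : Int) (parents : PySem.Set Int) : PySem.Set Int :=
  parents.foldl (fun t x => if v + x ≤ food then PySem.Set.add t (v + x) else t) PySem.Set.empty

-- Source B's 'reach(r, c)' with the memo dict threaded through explicitly; r, c are always ≥ 0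
-- in Source B, so they are carried as Nat
def pvReach (food : Int) (grid : List (List Int)) (r c : Nat)
    (memo : PySem.Dict (Nat × Nat) (PySem.Set Int)) :
    PySem.Dict (Nat × Nat) (PySem.Set Int) × PySem.Set Int :=
  match PySem.Dict.get? memo (r, c) with
  | some res => (memo, res)
  | none =>
    let row := grid.getD r []
    if row.length ≤ c then
      (PySem.Dict.insert memo (r, c) PySem.Set.empty, PySem.Set.empty)
    else if r = 0 ∧ c = 0 then
      let res := PySem.Set.ofList [row.getD 0 0]
      (PySem.Dict.insert memo (r, c) res, res)
    else
      let p := if hr : 0 < r then pvReach food grid (r - 1) c memo else (memo, PySem.Set.empty)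
      let q := if hc : 0 < c then pvReach food grid r (c - 1) p.1 else (p.1, PySem.Set.empty)
      let res := pvBuild food (row.getD c 0) (PySem.Set.union p.2 q.2)
      (PySem.Dict.insert q.1 (r, c) res, res)
termination_by r + c
decreasing_by all_goals omega

def answer_alt (food : Int) (grid : List (List Int)) : Int :=
  let N := grid.length
  let s := (pvReach food grid (N - 1) (N - 1) PySem.Dict.empty).2
  let feasible := s.filter (fun x => decide (x ≤ food))
  match PySem.List.max? feasible (fun x => x) with
  | some m => food - m
  | none => -1

-- ===== PRECONDITION & SPEC =====
-- Pre_ excludes empty grids and empty first rows (A raises IndexError reading grid[0][0]),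
-- and grids with a row longer than len(grid) — outside the natural square-grid domain —
-- where A raises IndexError as soon as any admissible path sum reaches a column ≥ len(grid)
-- (a data-dependent, not closed-form, condition) and otherwise happens to return the value
-- of its N-by-N-truncated DP, which B (never looking past column N-1) also returns.
def Pre_answer (food : Int) (grid : List (List Int)) : Prop :=
  grid ≠ [] ∧ grid.getD 0 [] ≠ [] ∧ ∀ row ∈ grid, row.length ≤ grid.length

instance (food : Int) (grid : List (List Int)) : Decidable (Pre_answer food grid) := by
  unfold Pre_answer; infer_instance

def pvWitness_answer : Int × List (List Int) := (3, [[1, 2], [3, 4]])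

def Spec_answer (food : Int) (grid : List (List Int)) (out : Int) : Prop :=
  out = answer_alt food grid
instance (food : Int) (grid : List (List Int)) (out : Int) : Decidable (Spec_answer food grid out) := by
  unfold Spec_answer; infer_instance

-- ===== CLAIM (what is proved, stated in full; the proofs are below) =====
def Claim_equal_answer : Prop := ∀ (food : Int) (grid : List (List Int)),
  Dom_answer food grid → Pre_answer food grid → Spec_answer food grid (answer food grid)

-- ===== LEMMAS AND PROOFS =====

-- the memo-free meaning of Source B's 'reach' (proof-side specification of B)
def reachSpec (food : Int) (grid : List (List Int)) (r c : Nat) : PySem.Set Int :=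
  let row := grid.getD r []
  if row.length <= c then PySem.Set.empty
  else if r = 0 ∧ c = 0 then PySem.Set.ofList [row.getD 0 0]
  else
    let p := if 0 < r then reachSpec food grid (r - 1) c else PySem.Set.empty
    let q := if 0 < c then reachSpec food grid r (c - 1) else PySem.Set.empty
    pvBuild food (row.getD c 0) (PySem.Set.union p q)
termination_by r + c
decreasing_by all_goals omega

lemma reachSpec_eq (food : Int) (grid : List (List Int)) (r c : Nat) :
    reachSpec food grid r c =
      if (grid.getD r []).length <= c then PySem.Set.empty
      else if r = 0 ∧ c = 0 then PySem.Set.ofList [(grid.getD r []).getD 0 0]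
      else
        pvBuild food ((grid.getD r []).getD c 0)
          (PySem.Set.union
            (if 0 < r then reachSpec food grid (r - 1) c else PySem.Set.empty)
            (if 0 < c then reachSpec food grid r (c - 1) else PySem.Set.empty)) := by
  rw [reachSpec]

lemma pvReach_eq (food : Int) (grid : List (List Int)) (r c : Nat)
    (memo : PySem.Dict (Nat × Nat) (PySem.Set Int)) :
    pvReach food grid r c memo =
      match PySem.Dict.get? memo (r, c) with
      | some res => (memo, res)
      | none =>
        if (grid.getD r []).length <= c then
          (PySem.Dict.insert memo (r, c) PySem.Set.empty, PySem.Set.empty)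
        else if r = 0 ∧ c = 0 then
          (PySem.Dict.insert memo (r, c) (PySem.Set.ofList [(grid.getD r []).getD 0 0]),
           PySem.Set.ofList [(grid.getD r []).getD 0 0])
        else
          let p := if _hr : 0 < r then pvReach food grid (r - 1) c memo
            else (memo, PySem.Set.empty)
          let q := if _hc : 0 < c then pvReach food grid r (c - 1) p.1
            else (p.1, PySem.Set.empty)
          (PySem.Dict.insert q.1 (r, c)
            (pvBuild food ((grid.getD r []).getD c 0) (PySem.Set.union p.2 q.2)),
           pvBuild food ((grid.getD r []).getD c 0) (PySem.Set.union p.2 q.2)) := by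
  rw [pvReach]

-- cell (r, c) of A's ans_grid, Nat indices
def cellN (g : List (List (PySem.Set Int))) (r c : Nat) : PySem.Set Int :=
  (g.getD r []).getD c []

-- "same members" (the invariant carried cell by cell)
def Eqv (s t : PySem.Set Int) : Prop := ∀ x : Int, x ∈ s ↔ x ∈ t

lemma getD_set_ne {α : Type} (l : List α) (i j : Nat) (x : α) (d : α) (h : i ≠ j) :
    (l.set i x).getD j d = l.getD j d := by
  rw [List.getD_eq_getElem?_getD, List.getElem?_set_ne h, ← List.getD_eq_getElem?_getD]

lemma getD_set_self {α : Type} (l : List α) (i : Nat) (x : α) (d : α) (h : i < l.length) :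
    (l.set i x).getD i d = x := by
  rw [List.getD_eq_getElem?_getD, List.getElem?_set_self h, Option.getD_some]

lemma mem_pvAddAll (food v : Int) :
    ∀ (src s : PySem.Set Int) (y : Int),
      y ∈ pvAddAll food v src s ↔ y ∈ s ∨ ∃ x ∈ src, y = v + x ∧ y ≤ food := by
  intro src
  induction src with
  | nil => intro s y; simp [pvAddAll]
  | cons a src ih =>
    intro s y
    have h : pvAddAll food v (a :: src) s =
        pvAddAll food v src (if v + a ≤ food then PySem.Set.add s (v + a) else s) := rfl
    rw [h, ih]
    by_cases ha : v + a ≤ food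
    · simp only [ha, if_pos, PySem.Set.mem_add, List.mem_cons]
      constructor
      · rintro (((hy | rfl) | ⟨x, hx, rfl, hxf⟩))
        · exact Or.inl hy
        · exact Or.inr ⟨a, Or.inl rfl, rfl, ha⟩
        · exact Or.inr ⟨x, Or.inr hx, rfl, hxf⟩
      · rintro (hy | ⟨x, (rfl | hx), rfl, hxf⟩)
        · exact Or.inl (Or.inl hy)
        · exact Or.inl (Or.inr rfl)
        · exact Or.inr ⟨x, hx, rfl, hxf⟩
    · simp only [ha, if_neg, not_false_iff, List.mem_cons]
      constructor
      · rintro (hy | ⟨x, hx, rfl, hxf⟩)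
        · exact Or.inl hy
        · exact Or.inr ⟨x, Or.inr hx, rfl, hxf⟩
      · rintro (hy | ⟨x, (rfl | hx), rfl, hxf⟩)
        · exact Or.inl hy
        · exact absurd hxf ha
        · exact Or.inr ⟨x, hx, rfl, hxf⟩

lemma pvBuild_eq (food v : Int) (s : PySem.Set Int) :
    pvBuild food v s = pvAddAll food v s PySem.Set.empty := rfl

lemma mem_pvBuild (food v : Int) (s : PySem.Set Int) (y : Int) :
    y ∈ pvBuild food v s ↔ ∃ x ∈ s, y = v + x ∧ y ≤ food := by
  rw [pvBuild_eq, mem_pvAddAll]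
  simp [PySem.Set.empty]

-- memo soundness: every entry of the memo dict is the memo-free value
def MemoOK (food : Int) (grid : List (List Int))
    (m : PySem.Dict (Nat × Nat) (PySem.Set Int)) : Prop :=
  ∀ r c s, PySem.Dict.get? m (r, c) = some s → s = reachSpec food grid r c

lemma memoOK_empty (food : Int) (grid : List (List Int)) :
    MemoOK food grid PySem.Dict.empty := by
  intro r c s h
  rw [PySem.Dict.get?_empty] at h
  exact absurd h (by simp)

lemma memoOK_insert (food : Int) (grid : List (List Int))
    (m : PySem.Dict (Nat × Nat) (PySem.Set Int)) (r c : Nat) (s : PySem.Set Int)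
    (hm : MemoOK food grid m) (hs : s = reachSpec food grid r c) :
    MemoOK food grid (PySem.Dict.insert m (r, c) s) := by
  intro r' c' s' h'
  rw [PySem.Dict.get?_insert] at h'
  by_cases he : ((r', c') : Nat × Nat) = (r, c)
  · rw [if_pos he] at h'
    have h1 : r' = r := congrArg Prod.fst he
    have h2 : c' = c := congrArg Prod.snd he
    subst h1; subst h2
    injection h' with h''
    rw [← h'']
    exact hs
  · rw [if_neg he] at h'
    exact hm r' c' s' h'

lemma pvReach_correct (food : Int) (grid : List (List Int)) :
    ∀ (n r c : Nat) (m : PySem.Dict (Nat × Nat) (PySem.Set Int)), r + c ≤ n →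
      MemoOK food grid m →
      (pvReach food grid r c m).2 = reachSpec food grid r c ∧
      MemoOK food grid (pvReach food grid r c m).1 := by
  intro n
  induction n with
  | zero =>
    intro r c m hle hm
    obtain rfl : r = 0 := by omega
    obtain rfl : c = 0 := by omega
    cases hg : PySem.Dict.get? m ((0 : Nat), (0 : Nat)) with
    | some s =>
      have he : pvReach food grid 0 0 m = (m, s) := by
        rw [pvReach_eq]; simp only [hg]
      rw [he]
      exact ⟨hm 0 0 s hg, hm⟩
    | none =>
      by_cases h1 : (grid.getD 0 []).length ≤ 0
      · have he : pvReach food grid 0 0 m =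
            (PySem.Dict.insert m (0, 0) PySem.Set.empty, PySem.Set.empty) := by
          rw [pvReach_eq]; simp only [hg]; rw [if_pos h1]
        have hs : PySem.Set.empty = reachSpec food grid 0 0 := by
          rw [reachSpec_eq, if_pos h1]
        rw [he]
        exact ⟨hs, memoOK_insert food grid m 0 0 _ hm hs⟩
      · have he : pvReach food grid 0 0 m =
            (PySem.Dict.insert m (0, 0) (PySem.Set.ofList [(grid.getD 0 []).getD 0 0]),
             PySem.Set.ofList [(grid.getD 0 []).getD 0 0]) := by
          rw [pvReach_eq]; simp only [hg]
          rw [if_neg h1]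
          simp only [and_self, if_true]
        have hs : PySem.Set.ofList [(grid.getD 0 []).getD 0 0] = reachSpec food grid 0 0 := by
          rw [reachSpec_eq]
          rw [if_neg h1, if_pos (show (0 : Nat) = 0 ∧ (0 : Nat) = 0 from ⟨rfl, rfl⟩)]
        rw [he]
        exact ⟨hs, memoOK_insert food grid m 0 0 _ hm hs⟩
  | succ n ih =>
    intro r c m hle hm
    cases hg : PySem.Dict.get? m (r, c) with
    | some s =>
      have he : pvReach food grid r c m = (m, s) := by
        rw [pvReach_eq]; simp only [hg]
      rw [he]
      exact ⟨hm r c s hg, hm⟩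
    | none =>
      by_cases h1 : (grid.getD r []).length ≤ c
      · have he : pvReach food grid r c m =
            (PySem.Dict.insert m (r, c) PySem.Set.empty, PySem.Set.empty) := by
          rw [pvReach_eq]; simp only [hg]; rw [if_pos h1]
        have hs : PySem.Set.empty = reachSpec food grid r c := by
          rw [reachSpec_eq, if_pos h1]
        rw [he]
        exact ⟨hs, memoOK_insert food grid m r c _ hm hs⟩
      · by_cases h2 : r = 0 ∧ c = 0
        · have he : pvReach food grid r c m =
              (PySem.Dict.insert m (r, c) (PySem.Set.ofList [(grid.getD r []).getD 0 0]),
               PySem.Set.ofList [(grid.getD r []).getD 0 0]) := by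
            rw [pvReach_eq]; simp only [hg]; rw [if_neg h1, if_pos h2]
          have hs : PySem.Set.ofList [(grid.getD r []).getD 0 0] = reachSpec food grid r c := by
            rw [reachSpec_eq, if_neg h1, if_pos h2]
          rw [he]
          exact ⟨hs, memoOK_insert food grid m r c _ hm hs⟩
        · by_cases hr : 0 < r
          · by_cases hc : 0 < c
            · obtain ⟨hp2, hp1⟩ := ih (r - 1) c m (by omega) hm
              obtain ⟨hq2, hq1⟩ :=
                ih r (c - 1) (pvReach food grid (r - 1) c m).1 (by omega) hp1
              have he : pvReach food grid r c m =
                  (PySem.Dict.insert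
                     (pvReach food grid r (c - 1) (pvReach food grid (r - 1) c m).1).1 (r, c)
                     (pvBuild food ((grid.getD r []).getD c 0)
                       (PySem.Set.union (pvReach food grid (r - 1) c m).2
                         (pvReach food grid r (c - 1) (pvReach food grid (r - 1) c m).1).2)),
                   pvBuild food ((grid.getD r []).getD c 0)
                     (PySem.Set.union (pvReach food grid (r - 1) c m).2
                       (pvReach food grid r (c - 1) (pvReach food grid (r - 1) c m).1).2)) := by
                rw [pvReach_eq]; simp only [hg]
                rw [if_neg h1, if_neg h2, dif_pos hr, dif_pos hc]
              have hs : pvBuild food ((grid.getD r []).getD c 0)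
                  (PySem.Set.union (pvReach food grid (r - 1) c m).2
                    (pvReach food grid r (c - 1) (pvReach food grid (r - 1) c m).1).2) =
                  reachSpec food grid r c := by
                rw [reachSpec_eq, if_neg h1, if_neg h2, if_pos hr, if_pos hc, hp2, hq2]
              rw [he]
              exact ⟨hs, memoOK_insert food grid _ r c _ hq1 hs⟩
            · obtain ⟨hp2, hp1⟩ := ih (r - 1) c m (by omega) hm
              have he : pvReach food grid r c m =
                  (PySem.Dict.insert (pvReach food grid (r - 1) c m).1 (r, c)
                     (pvBuild food ((grid.getD r []).getD c 0)
                       (PySem.Set.union (pvReach food grid (r - 1) c m).2 PySem.Set.empty)),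
                   pvBuild food ((grid.getD r []).getD c 0)
                     (PySem.Set.union (pvReach food grid (r - 1) c m).2 PySem.Set.empty)) := by
                rw [pvReach_eq]; simp only [hg]
                rw [if_neg h1, if_neg h2, dif_pos hr, dif_neg hc]
              have hs : pvBuild food ((grid.getD r []).getD c 0)
                  (PySem.Set.union (pvReach food grid (r - 1) c m).2 PySem.Set.empty) =
                  reachSpec food grid r c := by
                rw [reachSpec_eq, if_neg h1, if_neg h2, if_pos hr, if_neg hc, hp2]
              rw [he]
              exact ⟨hs, memoOK_insert food grid _ r c _ hp1 hs⟩
          · by_cases hc : 0 < c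
            · obtain ⟨hq2, hq1⟩ := ih r (c - 1) m (by omega) hm
              have he : pvReach food grid r c m =
                  (PySem.Dict.insert (pvReach food grid r (c - 1) m).1 (r, c)
                     (pvBuild food ((grid.getD r []).getD c 0)
                       (PySem.Set.union PySem.Set.empty (pvReach food grid r (c - 1) m).2)),
                   pvBuild food ((grid.getD r []).getD c 0)
                     (PySem.Set.union PySem.Set.empty (pvReach food grid r (c - 1) m).2)) := by
                rw [pvReach_eq]; simp only [hg]
                rw [if_neg h1, if_neg h2, dif_neg hr, dif_pos hc]
              have hs : pvBuild food ((grid.getD r []).getD c 0)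
                  (PySem.Set.union PySem.Set.empty (pvReach food grid r (c - 1) m).2) =
                  reachSpec food grid r c := by
                rw [reachSpec_eq, if_neg h1, if_neg h2, if_neg hr, if_pos hc, hq2]
              rw [he]
              exact ⟨hs, memoOK_insert food grid _ r c _ hq1 hs⟩
            · exact absurd ⟨by omega, by omega⟩ h2

lemma cellN_pvSetCellA (g : List (List (PySem.Set Int))) (r c : Nat) (v : PySem.Set Int)
    (hr : r < g.length) (hc : c < (g.getD r []).length) (r' c' : Nat) :
    cellN (pvSetCellA g (r : Int) (c : Int) v) r' c' =
      if r' = r ∧ c' = c then v else cellN g r' c' := by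
  have hset : pvSetCellA g (r : Int) (c : Int) v = g.set r ((g.getD r []).set c v) := by
    unfold pvSetCellA
    rw [PySem.List.pyGetD_natCast, PySem.List.pySetD_natCast, PySem.List.pySetD_natCast]
  rw [hset]
  unfold cellN
  by_cases h1 : r' = r
  · subst h1
    rw [getD_set_self g r' _ [] hr]
    by_cases h2 : c' = c
    · subst h2
      rw [getD_set_self _ c' _ [] hc]
      simp
    · rw [getD_set_ne _ c c' _ [] (fun h => h2 h.symm)]
      simp [h2]
  · rw [getD_set_ne g r r' _ [] (fun h => h1 h.symm)]
    simp [h1]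

lemma length_pvSetCellA (g : List (List (PySem.Set Int))) (r c : Nat) (v : PySem.Set Int) :
    (pvSetCellA g (r : Int) (c : Int) v).length = g.length := by
  unfold pvSetCellA
  rw [PySem.List.pyGetD_natCast, PySem.List.pySetD_natCast, PySem.List.pySetD_natCast,
    List.length_set]

lemma shape_pvSetCellA (g : List (List (PySem.Set Int))) (r c : Nat) (v : PySem.Set Int)
    (N : Nat) (hr : r < g.length) (hsh : ∀ row ∈ g, row.length = N) :
    ∀ row ∈ pvSetCellA g (r : Int) (c : Int) v, row.length = N := by
  have hset : pvSetCellA g (r : Int) (c : Int) v = g.set r ((g.getD r []).set c v) := by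
    unfold pvSetCellA
    rw [PySem.List.pyGetD_natCast, PySem.List.pySetD_natCast, PySem.List.pySetD_natCast]
  rw [hset]
  intro row hrow
  rcases List.mem_or_eq_of_mem_set hrow with h | rfl
  · exact hsh row h
  · rw [List.length_set]
    have hmem : g.getD r [] ∈ g := by
      rw [List.getD_eq_getElem?_getD, List.getElem?_eq_getElem hr, Option.getD_some]
      exact List.getElem_mem hr
    exact hsh _ hmem

lemma pvCellA_cast (g : List (List (PySem.Set Int))) (r c : Nat) :
    pvCellA g (r : Int) (c : Int) = cellN g r c := by
  simp [pvCellA, cellN, PySem.List.pyGetD_natCast]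


-- A's row-r fold over the remaining cells keeps every finished cell member-equal to reachSpec
lemma rowFoldR (food : Int) (grid : List (List Int)) (N r : Nat) (hrN : r < N)
    (hrlen : (grid.getD r []).length ≤ N) :
    ∀ (vs : List Int) (cs : Nat) (g : List (List (PySem.Set Int))),
      vs = (grid.getD r []).drop cs →
      g.length = N → (∀ row ∈ g, row.length = N) →
      1 ≤ r ∨ 1 ≤ cs →
      (∀ c : Nat, 1 ≤ r → Eqv (cellN g (r - 1) c) (reachSpec food grid (r - 1) c)) →
      (∀ c : Nat, c < cs → Eqv (cellN g r c) (reachSpec food grid r c)) →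
      (∀ c : Nat, cs ≤ c → cellN g r c = []) →
      ∀ g', g' = (PySem.List.enumerate vs (cs : Int)).foldl
         (fun h q => pvStep food h (r : Int) q.1 q.2) g →
       g'.length = N ∧ (∀ row ∈ g', row.length = N) ∧
       (∀ r' c' : Nat, r' ≠ r → cellN g' r' c' = cellN g r' c') ∧
       (∀ c : Nat, Eqv (cellN g' r c) (reachSpec food grid r c)) := by
  intro vs
  induction vs with
  | nil =>
    intro cs g hvs hglen hgsh _ _ hcur hempty g' hg'
    rw [PySem.List.enumerate_nil, List.foldl_nil] at hg'
    subst hg'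
    have hlen : (grid.getD r []).length ≤ cs := by
      by_contra hh
      push_neg at hh
      have hne := congrArg List.length hvs
      simp only [List.length_nil, List.length_drop] at hne
      omega
    refine ⟨hglen, hgsh, fun _ _ _ => rfl, ?_⟩
    intro c x
    rcases Nat.lt_or_ge c cs with hc | hc
    · exact hcur c hc x
    · rw [hempty c hc]
      have hsp : reachSpec food grid r c = PySem.Set.empty := by
        rw [reachSpec_eq, if_pos (by omega)]
      rw [hsp]
      simp [PySem.Set.empty]
  | cons v vt ih =>
    intro cs g hvs hglen hgsh hstart hprev hcur hempty g' hg'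
    have hcs : cs < (grid.getD r []).length := by
      by_contra hh
      push_neg at hh
      rw [List.drop_eq_nil_of_le hh] at hvs
      simp at hvs
    have hgetv : (grid.getD r []).getD cs 0 = v := by
      have h0 : ((grid.getD r []).drop cs).getD 0 0 = v := by rw [← hvs]; rfl
      rw [List.getD_eq_getElem?_getD, List.getElem?_drop] at h0
      rw [List.getD_eq_getElem?_getD]
      simpa using h0
    have hvt : vt = (grid.getD r []).drop (cs + 1) := by
      have ht := congrArg List.tail hvs
      simpa [List.tail_drop] using ht
    -- abbreviations for the two source cells of A's step
    set us : PySem.Set Int := if r = 0 then [] else cellN g (r - 1) cs with hus_def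
    set ls : PySem.Set Int := if cs = 0 then [] else cellN g r (cs - 1) with hls_def
    set snew : PySem.Set Int := pvAddAll food v ls (pvAddAll food v us []) with hsnew_def
    -- A's step at (r, cs) writes exactly snew
    have hAstep : pvStep food g (r : Int) (cs : Int) v = pvSetCellA g (r : Int) (cs : Int) snew := by
      have hs0 : pvCellA g (r : Int) (cs : Int) = [] := by
        rw [pvCellA_cast]; exact hempty cs le_rfl
      simp only [pvStep, hs0]
      congr 1
      rw [hsnew_def]
      rcases Nat.eq_zero_or_pos cs with hc0 | hc1
      · subst hc0
        rw [if_neg (by simp)]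
        rcases Nat.eq_zero_or_pos r with hr0 | hr1
        · subst hr0
          rw [if_neg (by simp)]
          rw [hus_def, hls_def]
          simp [pvAddAll]
        · rw [if_pos (by omega)]
          have h1 : ((r : Int) - 1) = ((r - 1 : Nat) : Int) := by omega
          rw [h1, pvCellA_cast]
          rw [hus_def, hls_def, if_pos rfl, if_neg (by omega)]
          simp [pvAddAll]
      · rw [if_pos (by omega)]
        have h2 : ((cs : Int) - 1) = ((cs - 1 : Nat) : Int) := by omega
        rw [h2, pvCellA_cast]
        rcases Nat.eq_zero_or_pos r with hr0 | hr1
        · subst hr0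
          rw [if_neg (by simp)]
          rw [hus_def, hls_def, if_neg (by omega), if_pos rfl]
          simp [pvAddAll]
        · rw [if_pos (by omega)]
          have h1 : ((r : Int) - 1) = ((r - 1 : Nat) : Int) := by omega
          rw [h1, pvCellA_cast]
          rw [hus_def, hls_def, if_neg (by omega), if_neg (by omega)]
    -- snew has exactly the members of reachSpec r cs
    have hnotz : ¬(r = 0 ∧ cs = 0) := by rcases hstart with h | h <;> omega
    have hus_mem : ∀ x : Int,
        x ∈ us ↔ x ∈ (if 0 < r then reachSpec food grid (r - 1) cs else PySem.Set.empty) := by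
      intro x
      by_cases hr : r = 0
      · rw [hus_def, if_pos hr, if_neg (by omega)]
        exact Iff.rfl
      · rw [hus_def, if_neg hr, if_pos (by omega)]
        exact hprev cs (by omega) x
    have hls_mem : ∀ x : Int,
        x ∈ ls ↔ x ∈ (if 0 < cs then reachSpec food grid r (cs - 1) else PySem.Set.empty) := by
      intro x
      by_cases hc : cs = 0
      · rw [hls_def, if_pos hc, if_neg (by omega)]
        exact Iff.rfl
      · rw [hls_def, if_neg hc, if_pos (by omega)]
        exact hcur (cs - 1) (by omega) x
    have hEq : Eqv snew (reachSpec food grid r cs) := by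
      intro y
      rw [hsnew_def, reachSpec_eq, if_neg (by omega), if_neg hnotz, hgetv]
      rw [mem_pvBuild, mem_pvAddAll, mem_pvAddAll]
      constructor
      · rintro ((hy | ⟨x, hx, rfl, hf⟩) | ⟨x, hx, rfl, hf⟩)
        · simp at hy
        · exact ⟨x, (PySem.Set.mem_union _ _ _).mpr (Or.inl ((hus_mem x).mp hx)), rfl, hf⟩
        · exact ⟨x, (PySem.Set.mem_union _ _ _).mpr (Or.inr ((hls_mem x).mp hx)), rfl, hf⟩
      · rintro ⟨x, hx, rfl, hf⟩
        rcases (PySem.Set.mem_union _ _ _).mp hx with hx | hx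
        · exact Or.inl (Or.inr ⟨x, (hus_mem x).mpr hx, rfl, hf⟩)
        · exact Or.inr ⟨x, (hls_mem x).mpr hx, rfl, hf⟩
    -- the written table
    have hrowN : (g.getD r []).length = N := by
      have hmem : g.getD r [] ∈ g := by
        rw [List.getD_eq_getElem?_getD, List.getElem?_eq_getElem (by omega), Option.getD_some]
        exact List.getElem_mem (by omega)
      exact hgsh _ hmem
    have hcell2 := cellN_pvSetCellA g r cs snew (by omega) (by omega)
    have hlen2 : (pvSetCellA g (r : Int) (cs : Int) snew).length = N := by
      rw [length_pvSetCellA, hglen]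
    have hsh2 := shape_pvSetCellA g r cs snew N (by omega) hgsh
    -- induction step
    have ihres := ih (cs + 1) (pvSetCellA g (r : Int) (cs : Int) snew) hvt hlen2 hsh2
      (Or.inr (by omega))
      (by
        intro c h1r x
        rw [hcell2, if_neg (by omega)]
        exact hprev c h1r x)
      (by
        intro c hclt x
        rcases Nat.lt_or_ge c cs with hlt | hge
        · rw [hcell2, if_neg (by omega)]
          exact hcur c hlt x
        · have hceq : c = cs := by omega
          subst hceq
          rw [hcell2, if_pos ⟨rfl, rfl⟩]
          exact hEq x)
      (by
        intro c hge
        rw [hcell2, if_neg (by omega)]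
        exact hempty c (by omega))
    have hcast1 : ((cs + 1 : Nat) : Int) = (cs : Int) + 1 := by push_cast; ring
    have henum : PySem.List.enumerate (v :: vt) (cs : Int) =
        ((cs : Int), v) :: PySem.List.enumerate vt ((cs + 1 : Nat) : Int) := by
      rw [PySem.List.enumerate_cons, hcast1]
    rw [henum] at hg'
    simp only [List.foldl_cons] at hg'
    rw [hAstep] at hg'
    obtain ⟨c1, c2, c5, c6⟩ := ihres g' hg'
    refine ⟨c1, c2, ?_, c6⟩
    intro r' c' hne
    rw [c5 r' c' hne, hcell2, if_neg (by simp [hne])]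

-- A's fold over the remaining rows
lemma gridFoldR (food : Int) (grid : List (List Int)) (N : Nat) (hNg : grid.length = N)
    (hsq : ∀ row ∈ grid, row.length ≤ N) :
    ∀ (k r : Nat) (g : List (List (PySem.Set Int))),
      1 ≤ r → r + k = N →
      g.length = N → (∀ row ∈ g, row.length = N) →
      (∀ c : Nat, Eqv (cellN g (r - 1) c) (reachSpec food grid (r - 1) c)) →
      (∀ r' c : Nat, r ≤ r' → cellN g r' c = []) →
      (∀ c : Nat,
        Eqv (cellN ((PySem.List.enumerate (grid.drop r) (r : Int)).foldl (pvRowA food) g)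
              (N - 1) c)
            (reachSpec food grid (N - 1) c)) := by
  intro k
  induction k with
  | zero =>
    intro r g h1r hsum hglen hgsh hprev hlater c
    have hdr : grid.drop r = [] := List.drop_eq_nil_of_le (by omega)
    rw [hdr]
    simp only [PySem.List.enumerate_nil, List.foldl_nil]
    have hr1 : r - 1 = N - 1 := by omega
    rw [← hr1]
    exact hprev c
  | succ k ih =>
    intro r g h1r hsum hglen hgsh hprev hlater
    have hrN : r < N := by omega
    have hdrop : grid.drop r = (grid.getD r []) :: grid.drop (r + 1) := by
      rw [List.getD_eq_getElem?_getD, List.getElem?_eq_getElem (by omega), Option.getD_some]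
      exact List.drop_eq_getElem_cons (by omega)
    rw [hdrop, PySem.List.enumerate_cons]
    simp only [List.foldl_cons]
    have hrowmem : grid.getD r [] ∈ grid := by
      rw [List.getD_eq_getElem?_getD, List.getElem?_eq_getElem (by omega), Option.getD_some]
      exact List.getElem_mem (by omega)
    have hrow : pvRowA food g ((r : Int), grid.getD r []) =
        (PySem.List.enumerate (grid.getD r []) ((0 : Nat) : Int)).foldl
          (fun h q => pvStep food h (r : Int) q.1 q.2) g := by
      simp [pvRowA]
    rw [hrow]
    have hrfold := rowFoldR food grid N r hrN (hsq _ hrowmem) (grid.getD r []) 0 g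
      (by simp) hglen hgsh (Or.inl h1r) (fun c _ => hprev c)
      (fun c hc => absurd hc (Nat.not_lt_zero c))
      (fun c _ => hlater r c le_rfl)
      _ rfl
    obtain ⟨d1, d2, d5, d6⟩ := hrfold
    have ihres := ih (r + 1)
      ((PySem.List.enumerate (grid.getD r []) ((0 : Nat) : Int)).foldl
        (fun h q => pvStep food h (r : Int) q.1 q.2) g)
      (by omega) (by omega) d1 d2
      (by
        intro c
        have hr1 : r + 1 - 1 = r := by omega
        rw [hr1]
        exact d6 c)
      (by
        intro r' c hge
        rw [d5 r' c (by omega)]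
        exact hlater r' c (by omega))
    have hcast : ((r + 1 : Nat) : Int) = (r : Int) + 1 := by push_cast; ring
    rw [← hcast]
    exact ihres

-- find? on a descending list returns the maximum admissible element
lemma find?_desc_isMax (f : Int) :
    ∀ (L : List Int), L.Pairwise (fun a b => b ≤ a) →
      ∀ m, L.find? (fun el => decide (el ≤ f)) = some m →
        m ∈ L ∧ m ≤ f ∧ ∀ y ∈ L, y ≤ f → y ≤ m := by
  intro L
  induction L with
  | nil => intro _ m h; simp at h
  | cons a L ih =>
    intro hp m hm
    by_cases ha : a ≤ f
    · have hd : decide (a ≤ f) = true := by simpa using ha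
      simp only [List.find?_cons, hd, Option.some.injEq] at hm
      subst hm
      refine ⟨List.mem_cons_self, ha, ?_⟩
      intro y hy _
      rcases List.mem_cons.mp hy with rfl | hy
      · exact le_refl y
      · exact (List.pairwise_cons.mp hp).1 y hy
    · have hd : decide (a ≤ f) = false := by simpa using ha
      simp only [List.find?_cons, hd] at hm
      obtain ⟨h1, h2, h3⟩ := ih (List.pairwise_cons.mp hp).2 m hm
      refine ⟨List.mem_cons_of_mem _ h1, h2, ?_⟩
      intro y hy hyf
      rcases List.mem_cons.mp hy with rfl | hy
      · exact absurd hyf ha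
      · exact h3 y hy hyf

-- the two final extractions agree on member-equal corner sets
lemma final_eq (food : Int) (Sa Sb : PySem.Set Int) (h : Eqv Sa Sb) :
    (match (PySem.List.sorted Sa (fun x => x) true).find? (fun el => decide (el ≤ food)) with
     | some el => food - el
     | none => (-1 : Int)) =
    (match PySem.List.max? (Sb.filter (fun x => decide (x ≤ food))) (fun x => x) with
     | some m => food - m
     | none => (-1 : Int)) := by
  have hpw : (PySem.List.sorted Sa (fun x => x) true).Pairwise (fun a b => b ≤ a) := by
    simpa using PySem.List.sorted_pairwise_rev (xs := Sa) (key := fun x => x)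
  cases hmax : PySem.List.max? (Sb.filter (fun x => decide (x ≤ food))) (fun x => x) with
  | none =>
    have hb : Sb.filter (fun x => decide (x ≤ food)) = [] :=
      (PySem.List.max?_eq_none_iff _ _).mp hmax
    have hnone : (PySem.List.sorted Sa (fun x => x) true).find?
        (fun el => decide (el ≤ food)) = none := by
      rw [List.find?_eq_none]
      intro x hx hxf
      have hxa : x ∈ Sa := (PySem.List.mem_sorted _ _ _ _).mp hx
      have hmemf : x ∈ Sb.filter (fun x => decide (x ≤ food)) :=
        List.mem_filter.mpr ⟨(h x).mp hxa, hxf⟩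
      rw [hb] at hmemf
      simp at hmemf
    rw [hnone]
  | some m =>
    have hmf := PySem.List.max?_mem hmax
    obtain ⟨hmb, hmle⟩ := List.mem_filter.mp hmf
    have hmle' : m ≤ food := by simpa using hmle
    have hma : m ∈ Sa := (h m).mpr hmb
    have hmsort : m ∈ PySem.List.sorted Sa (fun x => x) true := (PySem.List.mem_sorted _ _ _ _).mpr hma
    have hsome : ((PySem.List.sorted Sa (fun x => x) true).find?
        (fun el => decide (el ≤ food))).isSome := by
      rw [List.find?_isSome]
      exact ⟨m, hmsort, by simpa using hmle'⟩
    obtain ⟨m', hm'⟩ := Option.isSome_iff_exists.mp hsome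
    obtain ⟨hm'mem, hm'le, hm'max⟩ := find?_desc_isMax food _ hpw m' hm'
    have h1 : m ≤ m' := hm'max m hmsort hmle'
    have h2 : m' ≤ m := by
      have hm'a : m' ∈ Sa := (PySem.List.mem_sorted _ _ _ _).mp hm'mem
      have hm'f : m' ∈ Sb.filter (fun x => decide (x ≤ food)) :=
        List.mem_filter.mpr ⟨(h m').mp hm'a, by simpa using hm'le⟩
      simpa using PySem.List.max?_isMax hmax m' hm'f
    have hmm : m' = m := le_antisymm h2 h1
    rw [hm', hmm]

-- ===== VERDICT (by name: the statement is the Claim_ definition above) =====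
theorem answer_spec : Claim_equal_answer := by
  unfold Claim_equal_answer
  intro food grid hdom hpre
  obtain ⟨hne, h0ne, hlen⟩ := hpre
  unfold Spec_answer
  cases grid with
  | nil => exact absurd rfl hne
  | cons row0 rest =>
  cases row0 with
  | nil => exact absurd (by simp) h0ne
  | cons v0 r0t =>
  simp only [answer, answer_alt]
  have hg00 : PySem.List.pyGetD (PySem.List.pyGetD ((v0 :: r0t) :: rest) 0 []) 0 (0 : Int) = v0 := by
    rw [PySem.List.pyGetD_zero, PySem.List.pyGetD_zero]
    rfl
  rw [hg00]
  set grid := (v0 :: r0t) :: rest with hgrid_def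
  set Ng := grid.length with hNg_def
  have hNpos : 1 ≤ Ng := by rw [hNg_def, hgrid_def]; simp
  have hrow0 : grid.getD 0 [] = v0 :: r0t := rfl
  have hrow0len : 1 + r0t.length ≤ Ng := by
    have hm := hlen (v0 :: r0t) (by rw [hgrid_def]; exact List.mem_cons_self)
    simp only [List.length_cons] at hm
    omega
  have hofl : PySem.Set.ofList [v0] = [v0] := rfl
  set R0 : List (List (PySem.Set Int)) :=
    List.replicate Ng (List.replicate Ng PySem.Set.empty) with hR0_def
  have hRepCell : ∀ r' c' : Nat, cellN R0 r' c' = [] := by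
    intro r' c'
    rw [hR0_def]
    unfold cellN
    simp only [List.getD_eq_getElem?_getD, List.getElem?_replicate]
    split_ifs <;> simp [PySem.Set.empty]
  have hR0len : R0.length = Ng := by rw [hR0_def]; simp
  have hR0row0 : (R0.getD 0 []).length = Ng := by
    rw [hR0_def, List.getD_eq_getElem?_getD, List.getElem?_replicate, if_pos (by omega)]
    simp
  set INIT := pvSetCellA R0 0 0 (PySem.Set.ofList [v0]) with hINIT_def
  have hInitCell : ∀ r' c' : Nat,
      cellN INIT r' c' = if r' = 0 ∧ c' = 0 then [v0] else [] := by
    have h := cellN_pvSetCellA R0 0 0 (PySem.Set.ofList [v0]) (by omega) (by omega)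
    simp only [Nat.cast_zero] at h
    intro r' c'
    rw [hINIT_def, h r' c', hRepCell, hofl]
  have hIlen : INIT.length = Ng := by
    have h := length_pvSetCellA R0 0 0 (PySem.Set.ofList [v0])
    simp only [Nat.cast_zero] at h
    rw [hINIT_def, h, hR0len]
  have hIsh : ∀ row ∈ INIT, row.length = Ng := by
    have h := shape_pvSetCellA R0 0 0 (PySem.Set.ofList [v0]) Ng (by omega)
      (by intro row hrow; rw [hR0_def] at hrow; rw [List.eq_of_mem_replicate hrow]; simp)
    simp only [Nat.cast_zero] at h
    rw [hINIT_def]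
    exact h
  -- the first cell (0, 0): A's loop step there keeps the preset {grid[0][0]}
  have hstep1 : pvStep food INIT (0 : Int) (0 : Int) v0 = pvSetCellA INIT 0 0 [v0] := by
    simp only [pvStep, if_neg (by simp : ¬((0 : Int) ≠ 0))]
    congr 1
    have h := pvCellA_cast INIT 0 0
    simp only [Nat.cast_zero] at h
    rw [h, hInitCell 0 0, if_pos ⟨rfl, rfl⟩]
  set G1 := pvSetCellA INIT 0 0 [v0] with hG1_def
  have hG1cell : ∀ r' c' : Nat, cellN G1 r' c' = if r' = 0 ∧ c' = 0 then [v0] else [] := by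
    have h := cellN_pvSetCellA INIT 0 0 [v0] (by omega)
      (by
        have hm : INIT.getD 0 [] ∈ INIT := by
          rw [List.getD_eq_getElem?_getD, List.getElem?_eq_getElem (by omega), Option.getD_some]
          exact List.getElem_mem (by omega)
        rw [hIsh _ hm]; omega)
    simp only [Nat.cast_zero] at h
    intro r' c'
    rw [hG1_def, h r' c', hInitCell r' c']
    split_ifs with h1 <;> rfl
  have hG1len : G1.length = Ng := by
    have h := length_pvSetCellA INIT 0 0 [v0]
    simp only [Nat.cast_zero] at h
    rw [hG1_def, h, hIlen]
  have hG1sh : ∀ row ∈ G1, row.length = Ng := by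
    have h := shape_pvSetCellA INIT 0 0 [v0] Ng (by omega) hIsh
    simp only [Nat.cast_zero] at h
    rw [hG1_def]
    exact h
  -- cell (0,0) agrees with reachSpec
  have hspec00 : reachSpec food grid 0 0 = [v0] := by
    rw [reachSpec_eq, hrow0, if_neg (by simp), if_pos ⟨rfl, rfl⟩]
    rfl
  -- the rest of row 0
  have hrfold := rowFoldR food grid Ng 0 (by omega)
    (by rw [hrow0]; simp only [List.length_cons]; omega) r0t 1 G1
    (by rw [hrow0]; simp) hG1len hG1sh (Or.inr le_rfl)
    (fun c h => absurd h (by omega))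
    (by
      intro c hc x
      have hc0 : c = 0 := by omega
      subst hc0
      rw [hG1cell 0 0, if_pos ⟨rfl, rfl⟩, hspec00]
    )
    (by
      intro c hc
      rw [hG1cell 0 c, if_neg (by omega)])
    _ rfl
  simp only [Nat.cast_one, Nat.cast_zero] at hrfold
  obtain ⟨e1, e2, e5, e6⟩ := hrfold
  set G2 := (PySem.List.enumerate r0t (1 : Int)).foldl
    (fun h q => pvStep food h (0 : Int) q.1 q.2) G1 with hG2_def
  -- the remaining rows
  have hgfold := gridFoldR food grid Ng hNg_def.symm hlen
    rest.length 1 G2 le_rfl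
    (by rw [hNg_def, hgrid_def]; simp only [List.length_cons]; omega)
    e1 e2
    (by intro c; exact e6 c)
    (by
      intro r' c hge
      rw [e5 r' c (by omega), hG1cell r' c, if_neg (by omega)])
  have hdrop1 : grid.drop 1 = rest := by rw [hgrid_def]; rfl
  rw [hdrop1] at hgfold
  simp only [Nat.cast_one] at hgfold
  -- B's set is reachSpec at the corner
  have hBset : (pvReach food grid (Ng - 1) (Ng - 1) PySem.Dict.empty).2 =
      reachSpec food grid (Ng - 1) (Ng - 1) :=
    (pvReach_correct food grid (2 * Ng) (Ng - 1) (Ng - 1) PySem.Dict.empty (by omega)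
      (memoOK_empty food grid)).1
  -- assemble the folds in A
  have henum : PySem.List.enumerate grid =
      ((0 : Int), v0 :: r0t) :: PySem.List.enumerate rest ((0 : Int) + 1) := by
    rw [hgrid_def, PySem.List.enumerate_cons]
  rw [henum]
  simp only [List.foldl_cons, zero_add]
  have hrowA : pvRowA food INIT ((0 : Int), v0 :: r0t) = G2 := by
    simp only [pvRowA, PySem.List.enumerate_cons, List.foldl_cons, zero_add, hstep1]
    rw [hG2_def, hG1_def]
  rw [hrowA]
  have hcast : ((Ng : Int) - 1) = ((Ng - 1 : Nat) : Int) := by omega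
  rw [hcast]
  have hcella := pvCellA_cast
    ((PySem.List.enumerate rest (1 : Int)).foldl (pvRowA food) G2) (Ng - 1) (Ng - 1)
  rw [hcella, hBset]
  exact final_eq food _ _ (hgfold (Ng - 1))
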